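-- pv_equiv track=rewrite | github.com/saultyevil/badslashbot | slashbot/util.py | join_list_max_chars
-- ===== SOURCE A (Python) =====
-- from typing import Any, Dict, List
--
-- def join_list_max_chars(words: List[str], max_chars: int) -> str:
--     """Join a list of words into a comma-separated list.
--
--     Parameters
--     ----------
--     words : List[str]
--         A list of words to join together
--     max_chars : int
--         The maximum length the output string can be
--
--     Returns
--     -------
--     str
--         The joined words with "..." at the end if max_chars is hit
--     """
--     result = ""
--     current_length = 0
--
--     for word in words:
--         if current_length + len(word) > max_chars - 3:
--             if result:
--                 result += "..."
--             break
--         result += word + ", "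
--         current_length += len(word)
--
--     # Remove the trailing ", " if there's anything in the result
--     if result.endswith(", "):
--         result = result[:-2]
--
--     return result
-- ===== SOURCE B (Python) =====
-- from typing import List
--
--
-- def join_list_max_chars(words: List[str], max_chars: int) -> str:
--     """Join words comma-separated; truncate with ", ..." once max_chars is hit.
--
--     Computes the number k of leading words whose lengths fit within
--     max_chars - 3, then builds the result with a single join.
--     """
--     limit = max_chars - 3
--     total = 0
--     k = 0
--     for word in words:
--         if total + len(word) > limit:
--             break
--         total += len(word)
--         k += 1
--     if k == len(words):
--         return ", ".join(words)
--     if k == 0: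
--         return ""
--     return ", ".join(words[:k]) + ", ..."
-- ===== Notes on version B (the rewrite author's own statement) =====
-- stated objective: simpler
-- what changed: B replaces A's incremental string concatenation with trailing-', ' trimming by first computing the count k of leading words whose length sum fits within max_chars - 3 and then emitting the result with a single ', '.join (plus ', ...' when truncated).
import Mathlib
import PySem

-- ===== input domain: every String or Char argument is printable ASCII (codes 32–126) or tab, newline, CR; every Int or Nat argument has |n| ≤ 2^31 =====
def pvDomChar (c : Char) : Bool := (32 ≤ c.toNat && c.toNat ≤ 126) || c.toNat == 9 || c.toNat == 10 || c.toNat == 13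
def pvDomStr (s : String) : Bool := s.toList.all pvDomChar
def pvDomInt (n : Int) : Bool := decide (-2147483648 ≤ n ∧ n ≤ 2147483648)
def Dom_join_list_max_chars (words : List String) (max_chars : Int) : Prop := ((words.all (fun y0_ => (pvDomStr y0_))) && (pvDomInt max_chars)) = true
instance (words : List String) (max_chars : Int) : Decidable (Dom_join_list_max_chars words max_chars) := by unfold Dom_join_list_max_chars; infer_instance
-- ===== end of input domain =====

-- B replaces A's incremental string building + trailing-", " strip by computing the
-- number k of fitting words first and emitting the result with a single join (simpler).

-- ===== PORT A =====
-- the for-loop of A: state (result, current_length), break returns early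
def jlmcLoopA (max_chars : Int) : List String → String → Int → String
  | [], result, _ => result
  | w :: ws, result, cl =>
    if cl + (PySem.Str.len w : Int) > max_chars - 3 then
      if result ≠ "" then result ++ "..." else result
    else jlmcLoopA max_chars ws (result ++ w ++ ", ") (cl + (PySem.Str.len w : Int))

def join_list_max_chars (words : List String) (max_chars : Int) : String :=
  let result := jlmcLoopA max_chars words "" 0
  if PySem.Str.endswith result ", " then PySem.Str.slice result none (some (-2)) else result

-- ===== PORT B =====
-- B's loop: count how many leading words fit (running total of word lengths)
def jlmcCount (limit : Int) : List String → Int → Nat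
  | [], _ => 0
  | w :: ws, total =>
    if total + (PySem.Str.len w : Int) > limit then 0
    else 1 + jlmcCount limit ws (total + (PySem.Str.len w : Int))

def join_list_max_chars_alt (words : List String) (max_chars : Int) : String :=
  let k := jlmcCount (max_chars - 3) words 0
  if k = words.length then PySem.Str.join ", " words
  else if k = 0 then ""
  else PySem.Str.join ", " (words.take k) ++ ", ..."

-- ===== PRECONDITION & SPEC =====
def Spec_join_list_max_chars (words : List String) (max_chars : Int) (out : String) : Prop := out = join_list_max_chars_alt words max_chars
instance (words : List String) (max_chars : Int) (out : String) : Decidable (Spec_join_list_max_chars words max_chars out) := by unfold Spec_join_list_max_chars; infer_instance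

-- ===== CLAIM (what is proved, stated in full; the proofs are below) =====
def Claim_equal_join_list_max_chars : Prop := ∀ (words : List String) (max_chars : Int), Dom_join_list_max_chars words max_chars → Spec_join_list_max_chars words max_chars (join_list_max_chars words max_chars)

-- ===== LEMMAS AND PROOFS =====

-- "w1, w2, …, wk, " as a list of chars (A's accumulated result), for a char-list prefix
def jlmcJC (l : List (List Char)) : List Char := (l.map (fun cs => cs ++ [',', ' '])).flatten

-- the same prefix as a String
def jlmcS (l : List String) : String := String.ofList (jlmcJC (l.map String.toList))

theorem jlmcJC_eq_join (l : List (List Char)) (h : l ≠ []) :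
    jlmcJC l = PySem.Chars.join [',', ' '] l ++ [',', ' '] := by
  induction l with
  | nil => simp at h
  | cons a t ih =>
    cases t with
    | nil => simp [jlmcJC, PySem.Chars.join_singleton]
    | cons b r =>
      simp only [jlmcJC, List.map_cons, List.flatten_cons] at *
      rw [ih (by simp), PySem.Chars.join_cons_cons]
      simp

theorem jlmcS_append (pre : List String) (w : String) :
    jlmcS pre ++ w ++ ", " = jlmcS (pre ++ [w]) := by
  apply String.toList_injective
  simp [jlmcS, jlmcJC]

theorem jlmcS_eq_empty_iff (pre : List String) : (jlmcS pre = "") ↔ pre = [] := by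
  constructor
  · intro h
    cases pre with
    | nil => rfl
    | cons a t =>
      have := congrArg String.toList h
      simp [jlmcS, jlmcJC] at this
  · rintro rfl; rfl

-- A's loop, started on the accumulated prefix `pre`, in terms of B's count
theorem jlmcLoopA_eq (mc : Int) (ws : List String) :
    ∀ (pre : List String) (cl : Int),
    jlmcLoopA mc ws (jlmcS pre) cl =
      if jlmcCount (mc - 3) ws cl = ws.length then jlmcS (pre ++ ws)
      else if pre ++ ws.take (jlmcCount (mc - 3) ws cl) = [] then ""
      else jlmcS (pre ++ ws.take (jlmcCount (mc - 3) ws cl)) ++ "..." := by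
  induction ws with
  | nil =>
    intro pre cl; simp [jlmcLoopA, jlmcCount]
  | cons w ws ih =>
    intro pre cl
    by_cases hb : cl + (PySem.Str.len w : Int) > mc - 3
    · rw [jlmcLoopA, if_pos hb, jlmcCount, if_pos hb]
      rw [if_neg (by simp : ¬ (0 : Nat) = (w :: ws).length)]
      by_cases hp : pre = []
      · subst hp
        simp [jlmcS_eq_empty_iff]
      · have h1 : jlmcS pre ≠ "" := fun h => hp ((jlmcS_eq_empty_iff pre).mp h)
        rw [if_pos h1]
        simp [hp]
    · rw [jlmcLoopA, if_neg hb, jlmcCount, if_neg hb, jlmcS_append, ih (pre ++ [w])]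
      have hlen : 1 + jlmcCount (mc - 3) ws (cl + (PySem.Str.len w : Int)) = (w :: ws).length
          ↔ jlmcCount (mc - 3) ws (cl + (PySem.Str.len w : Int)) = ws.length := by
        simp; omega
      by_cases hk : jlmcCount (mc - 3) ws (cl + (PySem.Str.len w : Int)) = ws.length
      · rw [if_pos hk, if_pos (hlen.mpr hk)]
        simp
      · rw [if_neg hk, if_neg (fun h => hk (hlen.mp h))]
        have htake : (w :: ws).take (1 + jlmcCount (mc - 3) ws (cl + (PySem.Str.len w : Int)))
            = w :: ws.take (jlmcCount (mc - 3) ws (cl + (PySem.Str.len w : Int))) := by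
          rw [Nat.add_comm]; rfl
        rw [htake]
        simp

-- endswith ", " on the accumulated prefix: true iff something was accumulated
theorem jlmcS_endswith (pre : List String) (h : pre ≠ []) :
    PySem.Str.endswith (jlmcS pre) ", " = true := by
  have : ((", " : String).toList) <:+ (jlmcS pre).toList := by
    simp only [jlmcS, String.toList_ofList]
    rw [jlmcJC_eq_join _ (by simpa using h)]
    exact ⟨_, rfl⟩
  simpa [PySem.Chars.endswith_iff] using this

-- stripping the trailing ", " from the accumulated prefix gives the comma join
theorem jlmcS_strip (pre : List String) (h : pre ≠ []) :
    PySem.Str.slice (jlmcS pre) none (some (-2)) = PySem.Str.join ", " pre := by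
  apply String.toList_injective
  have h2 : (PySem.Str.slice (jlmcS pre) none (some (-2))).toList
      = (jlmcS pre).toList.take ((jlmcS pre).toList.length - 2) := by
    simp [PySem.Str.slice]
    rw [PySem.List.slice_to_neg_ofNat _ 2 (by omega)]
    simp
  rw [h2]
  simp only [jlmcS, String.toList_ofList]
  rw [jlmcJC_eq_join _ (by simpa using h)]
  have hl : (PySem.Chars.join [',', ' '] (pre.map String.toList)).length + ([',', ' '] : List Char).length - 2
      = (PySem.Chars.join [',', ' '] (pre.map String.toList)).length := by simp
  rw [List.length_append, hl, List.take_left]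
  simp [PySem.Str.toList_join]

-- a result ending in "..." does not end in ", "
theorem jlmc_dots_not_endswith (s : String) :
    PySem.Str.endswith (s ++ "...") ", " = false := by
  rw [← Bool.not_eq_true]
  intro h
  have h2 : ((", " : String).toList) <:+ (s ++ "...").toList := by
    simpa [PySem.Chars.endswith_iff] using h
  simp only [String.toList_append] at h2
  have h3 := List.reverse_prefix.mpr h2
  rw [List.reverse_append] at h3
  have : ("...".toList).reverse = ['.', '.', '.'] := by decide
  rw [this] at h3
  have : ((", " : String).toList).reverse = [' ', ','] := by decide
  rw [this] at h3
  obtain ⟨t, ht⟩ := h3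
  simp at ht

-- B's branches, rewritten through jlmcS (used to align with A's stripped result)
theorem jlmc_alt_mid (pre : List String) (h : pre ≠ []) :
    jlmcS pre ++ "..." = PySem.Str.join ", " pre ++ ", ..." := by
  apply String.toList_injective
  simp only [String.toList_append, jlmcS, String.toList_ofList]
  rw [jlmcJC_eq_join _ (by simpa using h)]
  simp [PySem.Str.toList_join]

-- ===== VERDICT (by name: the statement is the Claim_ definition above) =====
theorem join_list_max_chars_spec : Claim_equal_join_list_max_chars := by
  intro words mc _
  unfold Spec_join_list_max_chars join_list_max_chars join_list_max_chars_alt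
  have h0 : ("" : String) = jlmcS [] := rfl
  rw [h0, jlmcLoopA_eq]
  by_cases hk : jlmcCount (mc - 3) words 0 = words.length
  · rw [if_pos hk, if_pos hk]
    cases words with
    | nil => rfl
    | cons w ws =>
      simp only [List.nil_append]
      rw [jlmcS_endswith _ (by simp), if_pos rfl, jlmcS_strip _ (by simp)]
  · rw [if_neg hk, if_neg hk]
    by_cases h0' : jlmcCount (mc - 3) words 0 = 0
    · have : ([] : List String) ++ words.take (jlmcCount (mc - 3) words 0) = [] := by
        simp [h0']
      rw [if_pos this, if_pos h0']
      rfl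
    · have hne : ([] : List String) ++ words.take (jlmcCount (mc - 3) words 0) ≠ [] := by
        simp only [List.nil_append, ne_eq, List.take_eq_nil_iff, not_or]
        exact ⟨h0', fun hw => hk (by simp [hw, jlmcCount])⟩
      rw [if_neg hne, if_neg h0', List.nil_append]
      simp only [jlmc_dots_not_endswith, Bool.false_eq_true, if_false]
      exact jlmc_alt_mid _ (by simpa using hne)
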